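-- pv_equiv track=rewrite | github.com/JaredTweed/NormalForms-CanonicalCover | CanonicalCover.py | candidate_key_list
-- ===== SOURCE A (Python) =====
-- from itertools import combinations, permutations
--
-- def check_strings(list_of_strings, given_string):
--     for string in list_of_strings:
--         if set(string).issubset(set(given_string)):
--             # All characters in at least one string exist in the given string.
--             return True
--     return False
--
-- def fds_to_items(data):
--     # Convert a set of functional dependencies to a string of all the attributes in the dependencies
--     letters = set()
--     for item in data:
--         for letter in item:
--             letters.update(set(letter))
--
--     # Return the sorted string of attributes
--     return ''.join(sorted(letters))
--
-- def get_closure(attributes, fds):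
--     # Compute the closure of a set of attributes under a set of functional dependencies
--
--     # Set the closure to the original set of sorted attributes
--     attributes = ''.join(sorted(attributes))
--     closure = set(attributes)
--     changed = True
--
--     # Repeat until the closure no longer changes
--     while changed:
--         changed = False
--         # For each functional dependency in the set
--         for X, Y in fds:
--             # If the left-hand side of the dependency is a subset of the current closure
--             if set(X).issubset(closure):
--                 # If the right-hand side is not already in the closure
--                 if not set(Y).issubset(closure):
--                     # Add the right-hand side to the closure and mark that the closure has changed
--                     closure |= set(Y)
--                     changed = True
--
--     # Return the final closure
--     return closure
--
-- def candidate_key_list(fds):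
--     fdsItems = fds_to_items(fds)
--     candidateKeyList = []
--     for length in range(1, len(fdsItems) + 1):
--         for i in combinations(fdsItems, length):
--             attributes = "".join(sorted(i))
--
--             closure = get_closure(attributes, fds)
--
--             # Append list if the attributes are a candidate key
--             if(''.join(sorted(closure)) == fdsItems and check_strings(candidateKeyList, attributes) == False):
--                 candidateKeyList.append(str(attributes))
--     return candidateKeyList
-- ===== SOURCE B (Python) =====
-- from itertools import combinations
--
-- def candidate_key_list(fds):
--     # Universe of attributes, sorted.
--     fdsItems = ''.join(sorted({c for X, Y in fds for c in X + Y}))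
--     n = len(fdsItems)
--
--     # Index: for each attribute, the fds whose left-hand side mentions it.
--     watchers = {}
--     for X, Y in fds:
--         for c in set(X):
--             watchers.setdefault(c, []).append((X, Y))
--
--     def closure_size(start):
--         # Worklist closure: fire every fd enabled by the start set, then
--         # propagate each newly derived attribute through the watcher index.
--         closure = set(start)
--         queue = list(start)
--         for X, Y in fds:
--             if set(X) <= closure:
--                 for c in Y:
--                     if c not in closure:
--                         closure.add(c)
--                         queue.append(c)
--         while queue:
--             a = queue.pop(0)
--             for X, Y in watchers.get(a, []):
--                 if set(X) <= closure:
--                     for c in Y: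
--                         if c not in closure:
--                             closure.add(c)
--                             queue.append(c)
--         return len(closure)
--
--     keys = []
--     for length in range(1, n + 1):
--         for combo in combinations(fdsItems, length):
--             attributes = ''.join(combo)
--             if closure_size(attributes) == n and not any(set(k) <= set(attributes) for k in keys):
--                 keys.append(attributes)
--     return keys
-- ===== Notes on version B (the rewrite author's own statement) =====
-- stated objective: alternative
-- what changed: B keeps the same candidate enumeration but replaces A's repeated full re-scan fixpoint closure (get_closure) by a worklist closure driven by a precomputed attribute-to-fd watcher index, and tests superkeys by closure cardinality instead of rebuilding and comparing the sorted closure string.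
import Mathlib
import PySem

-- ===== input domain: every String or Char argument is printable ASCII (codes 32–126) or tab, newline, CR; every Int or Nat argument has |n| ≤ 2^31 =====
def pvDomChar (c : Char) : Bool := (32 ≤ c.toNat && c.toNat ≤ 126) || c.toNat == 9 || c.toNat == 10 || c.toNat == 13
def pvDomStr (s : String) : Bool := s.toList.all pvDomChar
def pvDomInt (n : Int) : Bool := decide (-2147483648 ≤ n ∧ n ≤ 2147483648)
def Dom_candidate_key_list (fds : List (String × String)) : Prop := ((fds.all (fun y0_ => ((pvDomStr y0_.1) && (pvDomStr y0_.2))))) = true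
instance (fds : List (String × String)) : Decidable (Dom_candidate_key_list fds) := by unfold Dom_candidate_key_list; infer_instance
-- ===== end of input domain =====

-- B replaces A's repeated full fixpoint passes per candidate by a worklist closure driven by a
-- precomputed attribute→fd watcher index, and tests superkeys by closure size (objective: alternative).

-- ===== PORT A =====

-- for string in list_of_strings: if set(string).issubset(set(given_string)): return True
def check_strings (list_of_strings : List String) (given_string : String) : Bool :=
  list_of_strings.any (fun s =>
    PySem.Set.issubset (PySem.Set.ofList s.toList) (PySem.Set.ofList given_string.toList))

-- letters.update over every attribute of every fd, then ''.join(sorted(letters))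
def fds_to_items (data : List (String × String)) : String :=
  let letters := data.foldl
    (fun s p => PySem.Set.update (PySem.Set.update s p.1.toList) p.2.toList) PySem.Set.empty
  String.ofList (PySem.List.sorted letters (fun c => c) false)

-- one 'for X, Y in fds' pass of A's while-loop body (state: closure, changed)
def closure_pass (fds : List (String × String)) (closure : PySem.Set Char) :
    PySem.Set Char × Bool :=
  fds.foldl (fun st p =>
    if PySem.Set.issubset (PySem.Set.ofList p.1.toList) st.1 then
      if !PySem.Set.issubset (PySem.Set.ofList p.2.toList) st.1 then
        (PySem.Set.union st.1 p.2.toList, true)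
      else st
    else st) (closure, false)

-- 'while changed' loop; the fuel only makes the loop total (it is provably sufficient: each
-- continuing pass strictly grows the closure, which stays inside the attributes of the input)
def closure_loop (fds : List (String × String)) : Nat → PySem.Set Char → PySem.Set Char
  | 0, c => c
  | fuel + 1, c =>
    let st := closure_pass fds c
    if st.2 then closure_loop fds fuel st.1 else c

def closure_fuel (attributes : String) (fds : List (String × String)) : Nat :=
  attributes.toList.length + (fds.map (fun p => p.2.toList.length)).sum + 1

def get_closure (attributes : String) (fds : List (String × String)) : PySem.Set Char :=
  let attrs := String.ofList (PySem.List.sorted attributes.toList (fun c => c) false)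
  closure_loop fds (closure_fuel attributes fds) (PySem.Set.ofList attrs.toList)

def candidate_key_list (fds : List (String × String)) : List String :=
  let fdsItems := fds_to_items fds
  (List.range fdsItems.toList.length).foldl (fun ckl len =>
    (PySem.List.combinations fdsItems.toList (len + 1)).foldl (fun ckl i =>
      let attributes := String.ofList (PySem.List.sorted i (fun c => c) false)
      let closure := get_closure attributes fds
      if (String.ofList (PySem.List.sorted closure (fun c => c) false) == fdsItems)
          && (check_strings ckl attributes == false)
      then ckl ++ [attributes] else ckl) ckl) []

-- ===== PORT B =====

-- watchers: for each attribute, the fds whose left-hand side mentions it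
def alt_watchers (fds : List (String × String)) :
    PySem.Dict Char (List (String × String)) :=
  fds.foldl (fun w p =>
    (PySem.Set.ofList p.1.toList).foldl (fun w c => w.modify c [] (· ++ [p])) w)
    PySem.Dict.empty

-- fire one fd against the (closure, queue) state if its LHS is inside the closure
def alt_fire (st : PySem.Set Char × List Char) (p : String × String) :
    PySem.Set Char × List Char :=
  if PySem.Set.issubset (PySem.Set.ofList p.1.toList) st.1 then
    p.2.toList.foldl (fun st c =>
      if PySem.Set.contains st.1 c then st else (PySem.Set.add st.1 c, st.2 ++ [c])) st
  else st

-- 'while queue' loop; fuel only makes it total (each pop is matched by one queue element, and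
-- every push is matched by one new closure element, both bounded by the input's attributes)
def alt_loop (w : PySem.Dict Char (List (String × String))) :
    Nat → PySem.Set Char × List Char → PySem.Set Char
  | 0, st => st.1
  | fuel + 1, st =>
    match st.2 with
    | [] => st.1
    | a :: q => alt_loop w fuel ((w.getD a []).foldl alt_fire (st.1, q))

def alt_fuel (start : List Char) (fds : List (String × String)) : Nat :=
  2 * start.length + (fds.map (fun p => p.2.toList.length)).sum + 1

def alt_closure_size (fds : List (String × String))
    (w : PySem.Dict Char (List (String × String))) (start : List Char) : Nat :=
  let st0 := fds.foldl alt_fire (PySem.Set.ofList start, start)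
  (alt_loop w (alt_fuel start fds) st0).length

def candidate_key_list_alt (fds : List (String × String)) : List String :=
  let fdsItems := String.ofList (PySem.List.sorted
    (PySem.Set.ofList (fds.flatMap (fun p => p.1.toList ++ p.2.toList))) (fun c => c) false)
  let n := fdsItems.toList.length
  let w := alt_watchers fds
  (List.range n).foldl (fun keys len =>
    (PySem.List.combinations fdsItems.toList (len + 1)).foldl (fun keys combo =>
      let attributes := String.ofList combo
      if (alt_closure_size fds w combo == n)
          && !(keys.any (fun k =>
            PySem.Set.issubset (PySem.Set.ofList k.toList) (PySem.Set.ofList attributes.toList)))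
      then keys ++ [attributes] else keys) keys) []

-- ===== PRECONDITION & SPEC =====
def Spec_candidate_key_list (fds : List (String × String)) (out : List String) : Prop := out = candidate_key_list_alt fds
instance (fds : List (String × String)) (out : List String) : Decidable (Spec_candidate_key_list fds out) := by unfold Spec_candidate_key_list; infer_instance

-- ===== CLAIM (what is proved, stated in full; the proofs are below) =====
def Claim_equal_candidate_key_list : Prop := ∀ (fds : List (String × String)), Dom_candidate_key_list fds → Spec_candidate_key_list fds (candidate_key_list fds)

-- ===== LEMMAS AND PROOFS =====

lemma nodup_length_le {l l' : List Char} (h : l.Nodup) (hs : l ⊆ l') :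
    l.length ≤ l'.length := by
  calc l.length = l.toFinset.card := (List.toFinset_card_of_nodup h).symm
    _ ≤ l'.toFinset.card := Finset.card_le_card (fun x hx => by
        simp only [List.mem_toFinset] at *; exact hs hx)
    _ ≤ l'.length := l'.toFinset_card_le

lemma union_shape (s : PySem.Set Char) (t : List Char) :
    ∃ e, PySem.Set.union s t = s ++ e := by
  exact ⟨_, PySem.Set.update_eq_append_filter s t⟩

lemma union_length_lt {s : PySem.Set Char} {t : List Char} (h : ¬ t ⊆ s) :
    s.length < (PySem.Set.union s t).length := by
  rw [List.subset_def] at h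
  push_neg at h
  obtain ⟨y, hy, hys⟩ := h
  have : PySem.Set.union s t = s ++ (PySem.Set.ofList t).filter (fun z => !(PySem.Set.contains s z)) :=
    PySem.Set.update_eq_append_filter s t
  rw [this, List.length_append]
  have hmem : y ∈ (PySem.Set.ofList t).filter (fun z => !(PySem.Set.contains s z)) := by
    rw [List.mem_filter]
    refine ⟨(PySem.Set.mem_ofList _ _).mpr hy, ?_⟩
    simp only [Bool.not_eq_true']
    rw [← Bool.not_eq_true, PySem.Set.contains_iff]
    exact hys
  have := List.length_pos_of_mem hmem
  omega

-- ----- A side -----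

def aStep (st : PySem.Set Char × Bool) (p : String × String) : PySem.Set Char × Bool :=
  if PySem.Set.issubset (PySem.Set.ofList p.1.toList) st.1 then
    if !PySem.Set.issubset (PySem.Set.ofList p.2.toList) st.1 then
      (PySem.Set.union st.1 p.2.toList, true)
    else st
  else st

lemma pass_eq (fds : List (String × String)) (c : PySem.Set Char) :
    closure_pass fds c = fds.foldl aStep (c, false) := rfl

lemma issubset_ofList_iff (s : List Char) (c : PySem.Set Char) :
    PySem.Set.issubset (PySem.Set.ofList s) c = true ↔ s ⊆ c := by
  rw [PySem.Set.issubset_iff]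
  constructor
  · exact fun h x hx => h x ((PySem.Set.mem_ofList _ _).mpr hx)
  · exact fun h x hx => h ((PySem.Set.mem_ofList _ _).mp hx)

lemma aStep_dichotomy (st : PySem.Set Char × Bool) (p : String × String) :
    (aStep st p = st ∧ (p.1.toList ⊆ st.1 → p.2.toList ⊆ st.1))
    ∨ (p.1.toList ⊆ st.1 ∧ ¬ p.2.toList ⊆ st.1
        ∧ aStep st p = (PySem.Set.union st.1 p.2.toList, true)) := by
  unfold aStep
  split_ifs with h1 h2
  · right
    rw [issubset_ofList_iff] at h1
    simp only [Bool.not_eq_true'] at h2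
    refine ⟨h1, ?_, rfl⟩
    rw [← issubset_ofList_iff p.2.toList st.1, h2]; simp
  · left
    simp only [Bool.not_eq_true', Bool.not_eq_false] at h2
    exact ⟨rfl, fun _ => (issubset_ofList_iff _ _).mp h2⟩
  · left
    refine ⟨rfl, fun hX => absurd hX ?_⟩
    intro hX
    exact h1 ((issubset_ofList_iff _ _).mpr hX)

lemma aStep_subset (st : PySem.Set Char × Bool) (p : String × String) :
    st.1 ⊆ (aStep st p).1 := by
  rcases aStep_dichotomy st p with ⟨h, -⟩ | ⟨-, -, h⟩ <;> rw [h]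
  · exact fun _ hx => hx
  · obtain ⟨e, he⟩ := union_shape st.1 p.2.toList
    simp only [he]; exact fun x hx => List.mem_append_left _ hx

lemma aFold_subset (l : List (String × String)) (st : PySem.Set Char × Bool) :
    st.1 ⊆ (l.foldl aStep st).1 := by
  induction l generalizing st with
  | nil => exact fun _ h => h
  | cons p t ih => exact fun x hx => ih (aStep st p) (aStep_subset st p hx)

lemma aStep_sound {T : List Char} {st : PySem.Set Char × Bool} {p : String × String}
    (hp : p.1.toList ⊆ T → p.2.toList ⊆ T) (hst : st.1 ⊆ T) : (aStep st p).1 ⊆ T := by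
  rcases aStep_dichotomy st p with ⟨h, -⟩ | ⟨hX, -, h⟩ <;> rw [h]
  · exact hst
  · intro x hx
    rw [PySem.Set.mem_union] at hx
    rcases hx with hx | hx
    · exact hst hx
    · exact hp (fun y hy => hst (hX hy)) hx

lemma aFold_sound {T : List Char} (l : List (String × String)) (st : PySem.Set Char × Bool)
    (hl : ∀ p ∈ l, p.1.toList ⊆ T → p.2.toList ⊆ T) (hst : st.1 ⊆ T) :
    (l.foldl aStep st).1 ⊆ T := by
  induction l generalizing st with
  | nil => exact hst
  | cons p t ih =>
    exact ih (aStep st p) (fun q hq => hl q (List.mem_cons_of_mem _ hq))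
      (aStep_sound (hl p List.mem_cons_self) hst)

lemma aStep_nodup {st : PySem.Set Char × Bool} {p : String × String}
    (h : st.1.Nodup) : (aStep st p).1.Nodup := by
  rcases aStep_dichotomy st p with ⟨he, -⟩ | ⟨-, -, he⟩ <;> rw [he]
  · exact h
  · exact PySem.Set.nodup_union _ _ h

lemma aFold_nodup (l : List (String × String)) (st : PySem.Set Char × Bool)
    (h : st.1.Nodup) : (l.foldl aStep st).1.Nodup := by
  induction l generalizing st with
  | nil => exact h
  | cons p t ih => exact ih (aStep st p) (aStep_nodup h)

lemma aStep_bound (st : PySem.Set Char × Bool) (p : String × String) :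
    (aStep st p).1 ⊆ st.1 ++ p.2.toList := by
  rcases aStep_dichotomy st p with ⟨he, -⟩ | ⟨-, -, he⟩ <;> rw [he]
  · exact fun x hx => List.mem_append_left _ hx
  · intro x hx
    rw [PySem.Set.mem_union] at hx
    rw [List.mem_append]
    exact hx

lemma aFold_bound (l : List (String × String)) (st : PySem.Set Char × Bool) :
    (l.foldl aStep st).1 ⊆ st.1 ++ l.flatMap (fun p => p.2.toList) := by
  induction l generalizing st with
  | nil => simp
  | cons p t ih =>
    intro x hx
    have := ih (aStep st p) hx
    rw [List.mem_append] at this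
    rcases this with h | h
    · have := aStep_bound st p h
      rw [List.mem_append] at this
      rcases this with h | h
      · exact List.mem_append_left _ h
      · exact List.mem_append_right _ (by simp [h])
    · exact List.mem_append_right _ (by simp [h])

lemma aStep_len_mono (st : PySem.Set Char × Bool) (p : String × String) :
    st.1.length ≤ (aStep st p).1.length := by
  rcases aStep_dichotomy st p with ⟨he, -⟩ | ⟨-, -, he⟩ <;> rw [he]
  obtain ⟨e, he'⟩ := union_shape st.1 p.2.toList
  show st.1.length ≤ (PySem.Set.union st.1 p.2.toList).length
  rw [he', List.length_append]
  omega

lemma aFold_len_mono (l : List (String × String)) (st : PySem.Set Char × Bool) :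
    st.1.length ≤ (l.foldl aStep st).1.length := by
  induction l generalizing st with
  | nil => exact le_rfl
  | cons p t ih => exact le_trans (aStep_len_mono st p) (ih (aStep st p))

lemma aFold_snd_mono (l : List (String × String)) (st : PySem.Set Char × Bool)
    (h : st.2 = true) : (l.foldl aStep st).2 = true := by
  induction l generalizing st with
  | nil => exact h
  | cons p t ih =>
    refine ih (aStep st p) ?_
    rcases aStep_dichotomy st p with ⟨he, -⟩ | ⟨-, -, he⟩ <;> rw [he] <;> simp [h]

lemma aFold_false (l : List (String × String)) (st : PySem.Set Char × Bool)
    (h : (l.foldl aStep st).2 = false) :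
    (l.foldl aStep st).1 = st.1 ∧ ∀ p ∈ l, p.1.toList ⊆ st.1 → p.2.toList ⊆ st.1 := by
  induction l generalizing st with
  | nil => exact ⟨rfl, by simp⟩
  | cons p t ih =>
    simp only [List.foldl_cons] at h ⊢
    rcases aStep_dichotomy st p with ⟨he, himp⟩ | ⟨-, -, he⟩
    · rw [he] at h ⊢
      obtain ⟨h1, h2⟩ := ih st h
      refine ⟨h1, fun q hq => ?_⟩
      rcases List.mem_cons.mp hq with rfl | hq
      · exact himp
      · exact h2 q hq
    · rw [he] at h
      exact absurd (aFold_snd_mono t _ rfl) (by rw [h]; simp)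

lemma aFold_grow (l : List (String × String)) (st : PySem.Set Char × Bool)
    (h0 : st.2 = false) (h : (l.foldl aStep st).2 = true) :
    st.1.length < (l.foldl aStep st).1.length := by
  induction l generalizing st with
  | nil => rw [List.foldl_nil] at h; rw [h0] at h; cases h
  | cons p t ih =>
    simp only [List.foldl_cons] at h ⊢
    rcases aStep_dichotomy st p with ⟨he, -⟩ | ⟨-, hY, he⟩
    · rw [he] at h ⊢; exact ih st h0 h
    · rw [he] at h ⊢
      calc st.1.length < (PySem.Set.union st.1 p.2.toList).length := union_length_lt hY
        _ ≤ _ := aFold_len_mono t (PySem.Set.union st.1 p.2.toList, true)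

-- ----- A loop -----

def FClosed (fds : List (String × String)) (S : List Char) : Prop :=
  ∀ p ∈ fds, p.1.toList ⊆ S → p.2.toList ⊆ S

lemma loopA_mono (fds : List (String × String)) (fuel : Nat) (c : PySem.Set Char) :
    c ⊆ closure_loop fds fuel c := by
  induction fuel generalizing c with
  | zero => exact fun _ h => h
  | succ n ih =>
    rw [closure_loop]
    simp only [pass_eq]
    split_ifs with h
    · exact fun x hx => ih _ (aFold_subset fds (c, false) hx)
    · exact fun _ h => h

lemma loopA_sound {T : List Char} (fds : List (String × String)) (hT : FClosed fds T)
    (fuel : Nat) (c : PySem.Set Char) (hc : c ⊆ T) : closure_loop fds fuel c ⊆ T := by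
  induction fuel generalizing c with
  | zero => exact hc
  | succ n ih =>
    rw [closure_loop]
    simp only [pass_eq]
    split_ifs with h
    · exact ih _ (aFold_sound fds (c, false) hT hc)
    · exact hc

lemma loopA_nodup (fds : List (String × String)) (fuel : Nat) (c : PySem.Set Char)
    (hc : c.Nodup) : (closure_loop fds fuel c).Nodup := by
  induction fuel generalizing c with
  | zero => exact hc
  | succ n ih =>
    rw [closure_loop]
    simp only [pass_eq]
    split_ifs with h
    · exact ih _ (aFold_nodup fds (c, false) hc)
    · exact hc

lemma loopA_closed {V : List Char} (fds : List (String × String))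
    (hV : ∀ p ∈ fds, p.2.toList ⊆ V) :
    ∀ (fuel : Nat) (c : PySem.Set Char), c.Nodup → c ⊆ V →
      V.length < fuel + c.length → FClosed fds (closure_loop fds fuel c) := by
  intro fuel
  induction fuel with
  | zero =>
    intro c hnd hcV hlen
    exact absurd (nodup_length_le hnd hcV) (by omega)
  | succ n ih =>
    intro c hnd hcV hlen
    rw [closure_loop]
    simp only [pass_eq]
    split_ifs with h
    · refine ih _ (aFold_nodup fds (c, false) hnd) ?_ ?_
      · intro x hx
        have := aFold_bound fds (c, false) hx
        rw [List.mem_append] at this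
        rcases this with h' | h'
        · exact hcV h'
        · obtain ⟨p, hp, hxp⟩ := List.mem_flatMap.mp h'
          exact hV p hp hxp
      · have hg : c.length < (List.foldl aStep (c, false) fds).1.length :=
          aFold_grow fds (c, false) rfl h
        omega
    · intro p hp hX
      have hfalse := aFold_false fds (c, false) (by simpa using h)
      rw [hfalse.1] at *
      exact hfalse.2 p hp hX

lemma sorted_mem (xs : List Char) (x : Char) :
    x ∈ PySem.List.sorted xs (fun c => c) false ↔ x ∈ xs :=
  (PySem.List.sorted_perm xs (fun c => c) false).mem_iff

lemma getc_start (attributes : String) (fds : List (String × String)) :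
    attributes.toList ⊆ get_closure attributes fds := by
  intro x hx
  unfold get_closure
  simp only [String.toList_ofList]
  apply loopA_mono
  rw [PySem.Set.mem_ofList, sorted_mem]
  exact hx

lemma getc_sound {T : List Char} (attributes : String) (fds : List (String × String))
    (hT : FClosed fds T) (hsub : attributes.toList ⊆ T) :
    get_closure attributes fds ⊆ T := by
  unfold get_closure
  simp only [String.toList_ofList]
  apply loopA_sound fds hT
  intro x hx
  rw [PySem.Set.mem_ofList, sorted_mem] at hx
  exact hsub hx

lemma getc_nodup (attributes : String) (fds : List (String × String)) :
    (get_closure attributes fds).Nodup := by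
  unfold get_closure
  exact loopA_nodup _ _ _ (PySem.Set.nodup_ofList _)

lemma getc_closed (attributes : String) (fds : List (String × String)) :
    FClosed fds (get_closure attributes fds) := by
  unfold get_closure
  simp only [String.toList_ofList]
  apply loopA_closed
    (V := PySem.Set.ofList (attributes.toList ++ fds.flatMap (fun p => p.2.toList)))
  · intro p hp x hx
    rw [PySem.Set.mem_ofList, List.mem_append]
    exact Or.inr (List.mem_flatMap.mpr ⟨p, hp, hx⟩)
  · exact PySem.Set.nodup_ofList _
  · intro x hx
    rw [PySem.Set.mem_ofList, sorted_mem] at hx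
    rw [PySem.Set.mem_ofList, List.mem_append]
    exact Or.inl hx
  · have h1 := PySem.Set.length_ofList_le (attributes.toList ++ fds.flatMap (fun p => p.2.toList))
    rw [List.length_append, List.length_flatMap] at h1
    have h2 : (PySem.Set.ofList (PySem.List.sorted attributes.toList (fun c => c) false)).length
        = ((PySem.Set.ofList (PySem.List.sorted attributes.toList (fun c => c) false)) : List Char).length := rfl
    unfold closure_fuel
    omega

-- ----- B side -----

def bStepY (st : PySem.Set Char × List Char) (c : Char) : PySem.Set Char × List Char :=
  if PySem.Set.contains st.1 c then st else (PySem.Set.add st.1 c, st.2 ++ [c])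

lemma fire_eq (st : PySem.Set Char × List Char) (p : String × String) :
    alt_fire st p =
      if PySem.Set.issubset (PySem.Set.ofList p.1.toList) st.1 then
        p.2.toList.foldl bStepY st
      else st := rfl

lemma bStepY_shape (st : PySem.Set Char × List Char) (c : Char) :
    ∃ e, bStepY st c = (st.1 ++ e, st.2 ++ e) := by
  unfold bStepY
  split_ifs with h
  · exact ⟨[], by simp⟩
  · refine ⟨[c], ?_⟩
    rw [PySem.Set.add_of_not_mem]
    exact fun hc => h ((PySem.Set.contains_iff _ _).mpr hc)

lemma bYFold_shape (t : List Char) (st : PySem.Set Char × List Char) :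
    ∃ e, t.foldl bStepY st = (st.1 ++ e, st.2 ++ e) := by
  induction t generalizing st with
  | nil => exact ⟨[], by simp⟩
  | cons c t ih =>
    obtain ⟨e1, he1⟩ := bStepY_shape st c
    rw [List.foldl_cons, he1]
    obtain ⟨e2, he2⟩ := ih (st.1 ++ e1, st.2 ++ e1)
    refine ⟨e1 ++ e2, ?_⟩
    rw [he2]
    simp [List.append_assoc]

lemma fire_shape (st : PySem.Set Char × List Char) (p : String × String) :
    ∃ e, alt_fire st p = (st.1 ++ e, st.2 ++ e) := by
  rw [fire_eq]
  split_ifs with h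
  · exact bYFold_shape _ _
  · exact ⟨[], by simp⟩

lemma bFold_shape (l : List (String × String)) (st : PySem.Set Char × List Char) :
    ∃ e, l.foldl alt_fire st = (st.1 ++ e, st.2 ++ e) := by
  induction l generalizing st with
  | nil => exact ⟨[], by simp⟩
  | cons p t ih =>
    obtain ⟨e1, he1⟩ := fire_shape st p
    rw [List.foldl_cons, he1]
    obtain ⟨e2, he2⟩ := ih (st.1 ++ e1, st.2 ++ e1)
    refine ⟨e1 ++ e2, ?_⟩
    rw [he2]
    simp [List.append_assoc]

lemma bStepY_nodup {st : PySem.Set Char × List Char} {c : Char}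
    (h : st.1.Nodup) : (bStepY st c).1.Nodup := by
  unfold bStepY
  split_ifs with hc
  · exact h
  · exact PySem.Set.nodup_add _ _ h

lemma bYFold_nodup (t : List Char) (st : PySem.Set Char × List Char)
    (h : st.1.Nodup) : (t.foldl bStepY st).1.Nodup := by
  induction t generalizing st with
  | nil => exact h
  | cons c t ih => exact ih _ (bStepY_nodup h)

lemma fire_nodup {st : PySem.Set Char × List Char} {p : String × String}
    (h : st.1.Nodup) : (alt_fire st p).1.Nodup := by
  rw [fire_eq]; split_ifs with hc
  · exact bYFold_nodup _ _ h
  · exact h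

lemma bFold_nodup (l : List (String × String)) (st : PySem.Set Char × List Char)
    (h : st.1.Nodup) : (l.foldl alt_fire st).1.Nodup := by
  induction l generalizing st with
  | nil => exact h
  | cons p t ih => exact ih _ (fire_nodup h)

lemma bStepY_bound (st : PySem.Set Char × List Char) (c : Char) :
    (bStepY st c).1 ⊆ st.1 ++ [c] := by
  unfold bStepY
  split_ifs with h
  · exact fun x hx => List.mem_append_left _ hx
  · intro x hx
    have := (PySem.Set.mem_add _ _ _).mp hx
    rw [List.mem_append]
    rcases this with h | h
    · exact Or.inl h
    · simp [h]

lemma bYFold_bound (t : List Char) (st : PySem.Set Char × List Char) :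
    (t.foldl bStepY st).1 ⊆ st.1 ++ t := by
  induction t generalizing st with
  | nil => simp
  | cons c t ih =>
    intro x hx
    have := ih (bStepY st c) hx
    rw [List.mem_append] at this
    rcases this with h | h
    · have := bStepY_bound st c h
      rw [List.mem_append] at this
      rcases this with h | h
      · exact List.mem_append_left _ h
      · rw [List.mem_append]; right; simp_all
    · rw [List.mem_append]; right; exact List.mem_cons_of_mem _ h

lemma fire_bound (st : PySem.Set Char × List Char) (p : String × String) :
    (alt_fire st p).1 ⊆ st.1 ++ p.2.toList := by
  rw [fire_eq]; split_ifs with h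
  · exact bYFold_bound _ _
  · exact fun x hx => List.mem_append_left _ hx

lemma bFold_bound (l : List (String × String)) (st : PySem.Set Char × List Char) :
    (l.foldl alt_fire st).1 ⊆ st.1 ++ l.flatMap (fun p => p.2.toList) := by
  induction l generalizing st with
  | nil => simp
  | cons p t ih =>
    intro x hx
    have := ih (alt_fire st p) hx
    rw [List.mem_append] at this
    rcases this with h | h
    · have := fire_bound st p h
      rw [List.mem_append] at this
      rcases this with h | h
      · exact List.mem_append_left _ h
      · exact List.mem_append_right _ (by simp [h])
    · exact List.mem_append_right _ (by simp [h])

lemma fire_sound {T : List Char} {st : PySem.Set Char × List Char} {p : String × String}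
    (hp : p.1.toList ⊆ T → p.2.toList ⊆ T) (hst : st.1 ⊆ T) : (alt_fire st p).1 ⊆ T := by
  rw [fire_eq]; split_ifs with h
  · intro x hx
    have := bYFold_bound p.2.toList st hx
    rw [List.mem_append] at this
    rcases this with h' | h'
    · exact hst h'
    · exact hp (fun y hy => hst ((issubset_ofList_iff _ _).mp h hy)) h'
  · exact hst

lemma bFold_sound {T : List Char} {fds : List (String × String)} (hT : FClosed fds T)
    (l : List (String × String)) (hl : ∀ p ∈ l, p ∈ fds) (st : PySem.Set Char × List Char)
    (hst : st.1 ⊆ T) : (l.foldl alt_fire st).1 ⊆ T := by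
  induction l generalizing st with
  | nil => exact hst
  | cons p t ih =>
    exact ih (fun q hq => hl q (List.mem_cons_of_mem _ hq)) _
      (fire_sound (hT p (hl p List.mem_cons_self)) hst)

lemma bYFold_covers (t : List Char) (st : PySem.Set Char × List Char) :
    t ⊆ (t.foldl bStepY st).1 := by
  induction t generalizing st with
  | nil => simp
  | cons c t ih =>
    intro x hx
    rcases List.mem_cons.mp hx with rfl | hx
    · obtain ⟨e, he⟩ := bYFold_shape t (bStepY st x)
      rw [List.foldl_cons, he]
      apply List.mem_append_left
      unfold bStepY
      split_ifs with h
      · exact (PySem.Set.contains_iff _ _).mp h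
      · exact (PySem.Set.mem_add _ _ _).mpr (Or.inr rfl)
    · exact ih (bStepY st c) hx

lemma fire_covers {st : PySem.Set Char × List Char} {p : String × String}
    (h : p.1.toList ⊆ st.1) : p.2.toList ⊆ (alt_fire st p).1 := by
  rw [fire_eq, if_pos ((issubset_ofList_iff _ _).mpr h)]
  exact bYFold_covers _ _

lemma bFold_covers {l : List (String × String)} {p : String × String} (hp : p ∈ l)
    (st : PySem.Set Char × List Char) (h : p.1.toList ⊆ st.1) :
    p.2.toList ⊆ (l.foldl alt_fire st).1 := by
  obtain ⟨l1, l2, rfl⟩ := List.append_of_mem hp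
  rw [List.foldl_append, List.foldl_cons]
  obtain ⟨e1, he1⟩ := bFold_shape l1 st
  obtain ⟨e2, he2⟩ := bFold_shape l2 (alt_fire (List.foldl alt_fire st l1) p)
  rw [he2]
  intro x hx
  apply List.mem_append_left
  apply fire_covers _ hx
  rw [he1]
  exact fun y hy => List.mem_append_left _ (h hy)

-- ----- watcher index -----

lemma wInner_getD_mono (s : List Char) (w : PySem.Dict Char (List (String × String)))
    (p : String × String) (a : Char) (q : String × String) (h : q ∈ w.getD a []) :
    q ∈ ((s.foldl (fun w c => w.modify c [] (· ++ [p])) w).getD a []) := by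
  induction s generalizing w with
  | nil => exact h
  | cons c t ih =>
    rw [List.foldl_cons]
    apply ih
    rw [PySem.Dict.getD_modify]
    split_ifs with hac
    · subst hac; exact List.mem_append_left _ h
    · exact h

lemma wInner_self (s : List Char) (w : PySem.Dict Char (List (String × String)))
    (p : String × String) (a : Char) (ha : a ∈ s) :
    p ∈ ((s.foldl (fun w c => w.modify c [] (· ++ [p])) w).getD a []) := by
  induction s generalizing w with
  | nil => cases ha
  | cons c t ih =>
    rw [List.foldl_cons]
    rcases List.mem_cons.mp ha with rfl | ha
    · apply wInner_getD_mono
      rw [PySem.Dict.getD_modify, if_pos rfl]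
      exact List.mem_append_right _ (by simp)
    · exact ih _ ha

lemma wOuter_getD_mono (l : List (String × String))
    (w : PySem.Dict Char (List (String × String))) (a : Char) (q : String × String)
    (h : q ∈ w.getD a []) :
    q ∈ ((l.foldl (fun w p =>
      (PySem.Set.ofList p.1.toList).foldl (fun w c => w.modify c [] (· ++ [p])) w) w).getD a []) := by
  induction l generalizing w with
  | nil => exact h
  | cons p t ih =>
    rw [List.foldl_cons]
    exact ih _ (wInner_getD_mono _ _ _ _ _ h)

lemma w_complete {fds : List (String × String)} {p : String × String} (hp : p ∈ fds)
    {a : Char} (ha : a ∈ p.1.toList) : p ∈ ((alt_watchers fds).getD a []) := by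
  obtain ⟨l1, l2, rfl⟩ := List.append_of_mem hp
  unfold alt_watchers
  rw [List.foldl_append, List.foldl_cons]
  apply wOuter_getD_mono
  exact wInner_self _ _ _ _ ((PySem.Set.mem_ofList _ _).mpr ha)

lemma wInner_vals (P : String × String → Prop) (s : List Char)
    (w : PySem.Dict Char (List (String × String))) (p : String × String)
    (hw : ∀ a q, q ∈ w.getD a [] → P q) (hP : P p) :
    ∀ a q, q ∈ ((s.foldl (fun w c => w.modify c [] (· ++ [p])) w).getD a []) → P q := by
  induction s generalizing w with
  | nil => exact hw
  | cons c t ih =>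
    rw [List.foldl_cons]
    apply ih
    intro a q hq
    rw [PySem.Dict.getD_modify] at hq
    split_ifs at hq with hac
    · rcases List.mem_append.mp hq with h | h
      · exact hw c q h
      · simp only [List.mem_singleton] at h; subst h; exact hP
    · exact hw a q hq

lemma w_vals {fds : List (String × String)} :
    ∀ a q, q ∈ ((alt_watchers fds).getD a []) → q ∈ fds := by
  unfold alt_watchers
  suffices h : ∀ (l : List (String × String)) (w : PySem.Dict Char (List (String × String))),
      (∀ a q, q ∈ w.getD a [] → q ∈ fds) → (∀ p ∈ l, p ∈ fds) →
      ∀ a q, q ∈ ((l.foldl (fun w p =>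
        (PySem.Set.ofList p.1.toList).foldl (fun w c => w.modify c [] (· ++ [p])) w) w).getD a []) → q ∈ fds by
    apply h fds _ ?_ (fun p hp => hp)
    intro a q hq
    rw [PySem.Dict.getD_empty] at hq
    cases hq
  intro l
  induction l with
  | nil => exact fun w hw _ => hw
  | cons p t ih =>
    intro w hw hl
    rw [List.foldl_cons]
    exact ih _ (wInner_vals _ _ _ _ hw (hl p List.mem_cons_self))
      (fun q hq => hl q (List.mem_cons_of_mem _ hq))

-- ----- B loop -----

lemma loopB_mono (w : PySem.Dict Char (List (String × String))) (fuel : Nat)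
    (st : PySem.Set Char × List Char) : st.1 ⊆ alt_loop w fuel st := by
  induction fuel generalizing st with
  | zero => exact fun _ h => h
  | succ n ih =>
    obtain ⟨c, q⟩ := st
    cases q with
    | nil => simp [alt_loop]
    | cons a q =>
      simp only [alt_loop]
      obtain ⟨e, he⟩ := bFold_shape ((w.getD a [])) (c, q)
      intro x hx
      apply ih
      rw [he]
      exact List.mem_append_left _ hx

lemma loopB_sound {T : List Char} {fds : List (String × String)} (hT : FClosed fds T)
    (fuel : Nat) (st : PySem.Set Char × List Char) (hst : st.1 ⊆ T) :
    alt_loop (alt_watchers fds) fuel st ⊆ T := by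
  induction fuel generalizing st with
  | zero => exact hst
  | succ n ih =>
    obtain ⟨c, q⟩ := st
    cases q with
    | nil => simpa [alt_loop] using hst
    | cons a q =>
      simp only [alt_loop]
      exact ih _ (bFold_sound hT _ (fun p hp => w_vals a p hp) (c, q) hst)

def JInv (fds : List (String × String)) (st : PySem.Set Char × List Char) : Prop :=
  ∀ p ∈ fds, (∀ x ∈ p.1.toList, x ∈ st.1 ∧ x ∉ st.2) → p.2.toList ⊆ st.1

lemma J_step {fds : List (String × String)} {c : PySem.Set Char} {a : Char} {q : List Char}
    (hJ : JInv fds (c, a :: q)) :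
    JInv fds (((alt_watchers fds).getD a []).foldl alt_fire (c, q)) := by
  obtain ⟨e, he⟩ := bFold_shape ((alt_watchers fds).getD a []) (c, q)
  intro p hp hx
  rw [he] at hx ⊢
  simp only at hx ⊢
  have hXc : p.1.toList ⊆ c := by
    intro x hxX
    obtain ⟨h1, h2⟩ := hx x hxX
    rcases List.mem_append.mp h1 with h | h
    · exact h
    · exact absurd (List.mem_append_right q h) h2
  by_cases ha : a ∈ p.1.toList
  · have := bFold_covers (w_complete hp ha) (c, q) hXc
    rw [he] at this
    exact this
  · have hY : p.2.toList ⊆ c := by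
      apply hJ p hp
      intro x hxX
      refine ⟨hXc hxX, ?_⟩
      intro hxq
      rcases List.mem_cons.mp hxq with rfl | hxq
      · exact ha hxX
      · exact (hx x hxX).2 (List.mem_append_left e hxq)
    exact fun x hxY => List.mem_append_left _ (hY hxY)

lemma loopB_closed {V : List Char} {fds : List (String × String)}
    (hV : ∀ p ∈ fds, p.2.toList ⊆ V) :
    ∀ (fuel : Nat) (st : PySem.Set Char × List Char), st.1.Nodup → st.1 ⊆ V →
      JInv fds st → st.2.length + V.length < fuel + st.1.length →
      FClosed fds (alt_loop (alt_watchers fds) fuel st) := by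
  intro fuel
  induction fuel with
  | zero =>
    intro st hnd hsV hJ hlen
    exact absurd (nodup_length_le hnd hsV) (by omega)
  | succ n ih =>
    intro st hnd hsV hJ hlen
    obtain ⟨c, q⟩ := st
    cases q with
    | nil =>
      simp only [alt_loop]
      intro p hp hX
      exact hJ p hp (fun x hx => ⟨hX hx, by simp⟩)
    | cons a q =>
      simp only [alt_loop]
      obtain ⟨e, he⟩ := bFold_shape ((alt_watchers fds).getD a []) (c, q)
      refine ih _ (bFold_nodup _ _ hnd) ?_ (J_step hJ) ?_
      · intro x hx
        have := bFold_bound ((alt_watchers fds).getD a []) (c, q) hx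
        rcases List.mem_append.mp this with h | h
        · exact hsV h
        · obtain ⟨p, hp, hxp⟩ := List.mem_flatMap.mp h
          exact hV p (w_vals a p hp) hxp
      · rw [he]
        simp only [List.length_append] at *
        simp only [List.length_cons] at hlen
        omega

-- ----- B closure characterization -----

def altClosure (fds : List (String × String)) (start : List Char) : PySem.Set Char :=
  alt_loop (alt_watchers fds) (alt_fuel start fds)
    (fds.foldl alt_fire (PySem.Set.ofList start, start))

lemma size_eq (fds : List (String × String)) (start : List Char) :
    alt_closure_size fds (alt_watchers fds) start = (altClosure fds start).length := rfl

lemma altc_start (fds : List (String × String)) (start : List Char) :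
    start ⊆ altClosure fds start := by
  intro x hx
  unfold altClosure
  obtain ⟨e, he⟩ := bFold_shape fds (PySem.Set.ofList start, start)
  apply loopB_mono
  rw [he]
  exact List.mem_append_left _ ((PySem.Set.mem_ofList _ _).mpr hx)

lemma altc_sound {T : List Char} {fds : List (String × String)} (hT : FClosed fds T)
    {start : List Char} (hs : start ⊆ T) : altClosure fds start ⊆ T := by
  unfold altClosure
  apply loopB_sound hT
  apply bFold_sound hT _ (fun p hp => hp)
  intro x hx
  exact hs ((PySem.Set.mem_ofList _ _).mp hx)

lemma loopB_nodup (w : PySem.Dict Char (List (String × String))) (fuel : Nat)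
    (st : PySem.Set Char × List Char) (h : st.1.Nodup) : (alt_loop w fuel st).Nodup := by
  induction fuel generalizing st with
  | zero => exact h
  | succ n ih =>
    obtain ⟨c, q⟩ := st
    cases q with
    | nil => simpa [alt_loop] using h
    | cons a q =>
      simp only [alt_loop]
      exact ih _ (bFold_nodup _ _ h)

lemma altc_nodup (fds : List (String × String)) (start : List Char) :
    (altClosure fds start).Nodup :=
  loopB_nodup _ _ _ (bFold_nodup _ _ (PySem.Set.nodup_ofList _))

lemma altc_closed (fds : List (String × String)) (start : List Char) :
    FClosed fds (altClosure fds start) := by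
  unfold altClosure
  obtain ⟨e, he⟩ := bFold_shape fds (PySem.Set.ofList start, start)
  apply loopB_closed (V := PySem.Set.ofList (start ++ fds.flatMap (fun p => p.2.toList)))
  · intro p hp x hx
    rw [PySem.Set.mem_ofList, List.mem_append]
    exact Or.inr (List.mem_flatMap.mpr ⟨p, hp, hx⟩)
  · exact bFold_nodup _ _ (PySem.Set.nodup_ofList _)
  · intro x hx
    have := bFold_bound fds (PySem.Set.ofList start, start) hx
    rw [PySem.Set.mem_ofList, List.mem_append]
    rcases List.mem_append.mp this with h | h
    · exact Or.inl ((PySem.Set.mem_ofList _ _).mp h)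
    · exact Or.inr h
  · intro p hp hx
    have hX : p.1.toList ⊆ (PySem.Set.ofList start : List Char) := by
      intro x hxX
      obtain ⟨h1, h2⟩ := hx x hxX
      rw [he] at h1 h2
      simp only at h1 h2
      exfalso
      rcases List.mem_append.mp h1 with h | h
      · exact h2 (List.mem_append_left _ ((PySem.Set.mem_ofList _ _).mp h))
      · exact h2 (List.mem_append_right _ h)
    exact bFold_covers hp (PySem.Set.ofList start, start) hX
  · rw [he]
    have h1 := PySem.Set.length_ofList_le (start ++ fds.flatMap (fun p => p.2.toList))
    rw [List.length_append, List.length_flatMap] at h1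
    unfold alt_fuel
    simp only [List.length_append]
    omega

-- ----- the two closures compute the same set -----

lemma closures_eq_mem (fds : List (String × String)) (s : String) (i : List Char)
    (hsi : ∀ x, x ∈ s.toList ↔ x ∈ i) (x : Char) :
    x ∈ get_closure s fds ↔ x ∈ altClosure fds i := by
  constructor
  · intro hx
    refine getc_sound s fds (altc_closed fds i) ?_ hx
    intro y hy
    exact altc_start fds i ((hsi y).mp hy)
  · intro hx
    refine altc_sound (getc_closed s fds) ?_ hx
    intro y hy
    exact getc_start s fds ((hsi y).mpr hy)

lemma closures_perm (fds : List (String × String)) (s : String) (i : List Char)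
    (hsi : ∀ x, x ∈ s.toList ↔ x ∈ i) :
    (get_closure s fds).Perm (altClosure fds i) :=
  (List.perm_ext_iff_of_nodup (getc_nodup s fds) (altc_nodup fds i)).mpr
    (closures_eq_mem fds s i hsi)

-- ----- the attribute universe -----

def itemsList (fds : List (String × String)) : List Char :=
  PySem.List.sorted
    (PySem.Set.ofList (fds.flatMap (fun p => p.1.toList ++ p.2.toList))) (fun c => c) false

lemma items_eq (fds : List (String × String)) :
    fds_to_items fds = String.ofList (itemsList fds) := by
  show String.ofList (PySem.List.sorted
    (fds.foldl (fun s p => PySem.Set.update (PySem.Set.update s p.1.toList) p.2.toList)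
      PySem.Set.empty) (fun c => c) false) = _
  unfold itemsList
  congr 2
  suffices h : ∀ (l : List (String × String)) (s : PySem.Set Char),
      l.foldl (fun s p => PySem.Set.update (PySem.Set.update s p.1.toList) p.2.toList) s
        = PySem.Set.update s (l.flatMap fun p => p.1.toList ++ p.2.toList) by
    rw [h]
    exact PySem.Set.update_nil_left _
  intro l
  induction l with
  | nil => intro s; simp [PySem.Set.update_nil]
  | cons p t ih =>
    intro s
    rw [List.foldl_cons, ih, List.flatMap_cons, List.append_assoc,
      PySem.Set.update_append, PySem.Set.update_append]

lemma items_nodup (fds : List (String × String)) : (itemsList fds).Nodup :=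
  ((PySem.List.sorted_perm _ _ _).nodup_iff).mpr (PySem.Set.nodup_ofList _)

lemma items_pairwise (fds : List (String × String)) :
    (itemsList fds).Pairwise (fun a b => a ≤ b) :=
  PySem.List.sorted_pairwise _ _

lemma items_closed (fds : List (String × String)) : FClosed fds (itemsList fds) := by
  intro p hp _ x hx
  unfold itemsList
  rw [sorted_mem, PySem.Set.mem_ofList]
  exact List.mem_flatMap.mpr ⟨p, hp, List.mem_append_right _ hx⟩

lemma sorted_id_of_sublist {I i : List Char} (hpw : I.Pairwise (fun a b => a ≤ b))
    (h : i.Sublist I) : PySem.List.sorted i (fun c => c) false = i := by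
  apply PySem.List.eq_of_perm_of_pairwise_le_of_injective (key := fun c => c)
    (fun a b hab => hab)
  · exact PySem.List.sorted_perm i _ false
  · exact PySem.List.sorted_pairwise i _
  · exact List.Pairwise.sublist h hpw

-- ----- the candidate-key test agrees -----

lemma cond_iff (fds : List (String × String)) (i : List Char) (hi : i ⊆ itemsList fds) :
    (String.ofList (PySem.List.sorted (get_closure (String.ofList i) fds) (fun c => c) false)
        = String.ofList (itemsList fds))
      ↔ (altClosure fds i).length = (itemsList fds).length := by
  have hsi : ∀ x, x ∈ (String.ofList i).toList ↔ x ∈ i := by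
    intro x; rw [String.toList_ofList]
  have hperm := closures_perm fds (String.ofList i) i hsi
  constructor
  · intro h
    have hl : PySem.List.sorted (get_closure (String.ofList i) fds) (fun c => c) false
        = itemsList fds := by
      have := congrArg String.toList h
      simpa [String.toList_ofList] using this
    have hlen : (get_closure (String.ofList i) fds).length = (itemsList fds).length := by
      rw [← hl]
      exact (PySem.List.sorted_perm _ _ _).length_eq.symm
    rw [← hperm.length_eq]
    exact hlen
  · intro h
    have hlen : (get_closure (String.ofList i) fds).length = (itemsList fds).length := by
      rw [hperm.length_eq]; exact h
    have hsub : get_closure (String.ofList i) fds ⊆ itemsList fds := by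
      refine getc_sound _ fds (items_closed fds) ?_
      intro y hy
      rw [String.toList_ofList] at hy
      exact hi hy
    have hpermI : (get_closure (String.ofList i) fds).Perm (itemsList fds) := by
      have h1 : (get_closure (String.ofList i) fds).toFinset ⊆ (itemsList fds).toFinset := by
        intro x hx
        rw [List.mem_toFinset] at *
        exact hsub hx
      have hc1 := List.toFinset_card_of_nodup (getc_nodup (String.ofList i) fds)
      have hc2 := List.toFinset_card_of_nodup (items_nodup fds)
      have hfe : (get_closure (String.ofList i) fds).toFinset = (itemsList fds).toFinset :=
        Finset.eq_of_subset_of_card_le h1 (by omega)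
      refine (List.perm_ext_iff_of_nodup (getc_nodup _ _) (items_nodup fds)).mpr ?_
      intro a
      rw [← List.mem_toFinset, ← List.mem_toFinset (l := itemsList fds), hfe]
    have hsorted : PySem.List.sorted (get_closure (String.ofList i) fds) (fun c => c) false
        = itemsList fds := by
      apply PySem.List.eq_of_perm_of_pairwise_le_of_injective (key := fun c => c)
        (fun a b hab => hab)
      · exact (PySem.List.sorted_perm _ _ _).trans hpermI
      · exact PySem.List.sorted_pairwise _ _
      · exact items_pairwise fds
    rw [hsorted]

lemma itemsList_def (fds : List (String × String)) :
    PySem.List.sorted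
      (PySem.Set.ofList (fds.flatMap (fun p => p.1.toList ++ p.2.toList))) (fun c => c) false
      = itemsList fds := rfl

lemma main_eq (fds : List (String × String)) :
    candidate_key_list fds = candidate_key_list_alt fds := by
  simp only [candidate_key_list, candidate_key_list_alt, items_eq, itemsList_def,
    String.toList_ofList]
  apply PySem.List.foldl_congr_mem
  intro acc len hlen
  apply PySem.List.foldl_congr_mem
  intro ckl i hi
  have hsl : i.Sublist (itemsList fds) := PySem.List.sublist_of_mem_combinations hi
  have hsi : PySem.List.sorted i (fun c => c) false = i :=
    sorted_id_of_sublist (items_pairwise fds) hsl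
  rw [hsi]
  have hcond : ((String.ofList
        (PySem.List.sorted (get_closure (String.ofList i) fds) (fun c => c) false)
          == String.ofList (itemsList fds)))
      = (alt_closure_size fds (alt_watchers fds) i == (itemsList fds).length) := by
    rw [Bool.eq_iff_iff]
    simp only [beq_iff_eq]
    rw [size_eq]
    exact cond_iff fds i hsl.subset
  rw [hcond, check_strings, show ∀ b : Bool, (b == false) = !b from by decide]
  simp only [String.toList_ofList]

-- ===== VERDICT (by name: the statement is the Claim_ definition above) =====
theorem candidate_key_list_spec : Claim_equal_candidate_key_list := by
  intro fds _
  exact main_eq fds
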